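-- pv_equiv track=rewrite | github.com/benquick123/code-profiling | code/batch-2/vse-naloge-brez-testov/DN7-M-095.py | preberi_pot
-- ===== SOURCE A (Python) =====
-- def preberi_pot(ukazi):
--     """
--     Za podani seznam ukazov (glej navodila naloge) vrni pot.
--
--     Args:
--         ukazi (str): ukazi, napisani po vrsticah
--
--     Returns:
--         list of tuple of int: pot
--     """
--     kot = 90
--     pot = [(0, 0)]
--     koordinate = (0, 0)
--     for el in ukazi.split("\n"):
--         if el == "DESNO":
--             if kot == -90:
--                 kot = 180
--             else:
--                 kot = kot - 90
--         elif el == "LEVO":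
--             if kot == 180:
--                 kot = -90
--             else:
--                 kot += 90
--         elif el != "":
--             if kot == 0:
--                 koordinate = (koordinate[0] + int(el), koordinate[1])
--             elif kot == 90:
--                 koordinate = (koordinate[0], koordinate[1] - int(el))
--             elif kot == 180:
--                 koordinate = (koordinate[0] - int(el), koordinate[1])
--             elif kot == -90:
--                 koordinate = (koordinate[0], koordinate[1] + int(el))
--             pot.append(koordinate)
--     return pot
-- ===== SOURCE B (Python) =====
-- def preberi_pot(ukazi):
--     """
--     Za podani seznam ukazov (glej navodila naloge) vrni pot.
--
--     Args:
--         ukazi (str): ukazi, napisani po vrsticah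
--
--     Returns:
--         list of tuple of int: pot
--     """
--     vrstice = ukazi.split("\n")
--     SMERI = [(1, 0), (0, -1), (-1, 0), (0, 1)]
--     # stage 1: one displacement vector per move line; the heading of the i-th
--     # line is read off the net turn count of the lines before it (no state machine)
--     premiki = []
--     for i, el in enumerate(vrstice):
--         if el not in ("", "DESNO", "LEVO"):
--             h = (1 + vrstice[:i].count("LEVO") - vrstice[:i].count("DESNO")) % 4
--             n = int(el)
--             premiki.append((SMERI[h][0] * n, SMERI[h][1] * n))
--     # stage 2: the path is the prefix sums of the displacements
--     x = y = 0
--     pot = [(0, 0)]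
--     for vx, vy in premiki:
--         x += vx
--         y += vy
--         pot.append((x, y))
--     return pot
-- ===== Notes on version B (the rewrite author's own statement) =====
-- stated objective: alternative
-- what changed: Replaces A's single running state machine (angle normalised and dispatched through branch chains while coordinates are updated in the same loop) by staged passes: each move line's heading is read off the net turn count of the preceding lines (prefix counts of LEVO/DESNO mod 4) and a direction table indexed by it, producing a list of displacement vectors whose prefix sums are the path.
import Mathlib
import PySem

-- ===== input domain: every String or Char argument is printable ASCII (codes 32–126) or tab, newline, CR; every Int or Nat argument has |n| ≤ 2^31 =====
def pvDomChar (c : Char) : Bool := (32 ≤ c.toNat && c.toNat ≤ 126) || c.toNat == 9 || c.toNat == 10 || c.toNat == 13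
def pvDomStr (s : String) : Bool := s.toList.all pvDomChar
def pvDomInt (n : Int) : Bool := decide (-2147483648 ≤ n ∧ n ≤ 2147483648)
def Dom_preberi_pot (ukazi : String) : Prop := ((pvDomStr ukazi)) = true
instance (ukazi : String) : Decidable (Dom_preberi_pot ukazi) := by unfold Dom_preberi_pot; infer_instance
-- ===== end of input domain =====

-- B replaces A's running state machine (angle + coordinate updated in one loop) by staged passes:
-- per-line headings read off prefix turn counts and a direction table, then prefix sums of displacements.

-- ===== PORT A =====
-- one loop iteration of A: state = (kot, koordinate, pot)
def preberiStepA (st : Int × (Int × Int) × List (Int × Int)) (el : String) :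
    Int × (Int × Int) × List (Int × Int) :=
  let kot := st.1
  let k := st.2.1
  let pot := st.2.2
  if el = "DESNO" then
    (if kot = -90 then 180 else kot - 90, k, pot)
  else if el = "LEVO" then
    (if kot = 180 then -90 else kot + 90, k, pot)
  else if el ≠ "" then
    match PySem.Int.ofStr? el with
    | some n =>
      let k' :=
        if kot = 0 then (k.1 + n, k.2)
        else if kot = 90 then (k.1, k.2 - n)
        else if kot = 180 then (k.1 - n, k.2)
        else if kot = -90 then (k.1, k.2 + n)
        else k
      (kot, k', pot ++ [k'])
    | none => st  -- int(el) raises ValueError; excluded by Pre_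
  else st

def preberi_pot (ukazi : String) : List (Int × Int) :=
  (((PySem.Str.split? ukazi "\n").getD []).foldl preberiStepA (90, (0, 0), [(0, 0)])).2.2

-- ===== PORT B =====
-- the direction table SMERI
def pvSmeri : List (Int × Int) := [(1, 0), (0, -1), (-1, 0), (0, 1)]

-- stage-1 loop body: for (i, el), a non-command line contributes one displacement,
-- with heading (1 + vrstice[:i].count("LEVO") - vrstice[:i].count("DESNO")) % 4
def premikStep (vrstice : List String) (acc : List (Int × Int)) (p : Int × String) :
    List (Int × Int) :=
  if p.2 = "" ∨ p.2 = "DESNO" ∨ p.2 = "LEVO" then acc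
  else
    match PySem.Int.ofStr? p.2 with
    | some n =>
      let pre := PySem.List.slice vrstice none (some p.1)
      let h := PySem.Int.mod
        (1 + (PySem.List.count pre "LEVO" : Int) - (PySem.List.count pre "DESNO" : Int)) 4
      let d := (PySem.List.pyGet? pvSmeri h).getD (0, 0)  -- h ∈ [0,4): SMERI[h] never raises
      acc ++ [(d.1 * n, d.2 * n)]
    | none => acc  -- int(el) raises ValueError; excluded by Pre_

def premiki (vrstice : List String) : List (Int × Int) :=
  (PySem.List.enumerate vrstice).foldl (premikStep vrstice) []

-- stage-2 loop body: prefix sums, state = ((x, y), pot)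
def potStep (st : (Int × Int) × List (Int × Int)) (v : Int × Int) :
    (Int × Int) × List (Int × Int) :=
  ((st.1.1 + v.1, st.1.2 + v.2), st.2 ++ [(st.1.1 + v.1, st.1.2 + v.2)])

def preberi_pot_alt (ukazi : String) : List (Int × Int) :=
  ((premiki ((PySem.Str.split? ukazi "\n").getD [])).foldl potStep ((0, 0), [(0, 0)])).2

-- ===== PRECONDITION & SPEC =====
-- Pre_ excludes exactly the inputs where A raises ValueError: a non-empty line other than
-- DESNO/LEVO that int() cannot parse.
def Pre_preberi_pot (ukazi : String) : Prop :=
  ∀ el ∈ (PySem.Str.split? ukazi "\n").getD [],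
    el = "DESNO" ∨ el = "LEVO" ∨ el = "" ∨ (PySem.Int.ofStr? el).isSome = true
instance (ukazi : String) : Decidable (Pre_preberi_pot ukazi) := by
  unfold Pre_preberi_pot; infer_instance

def pvWitness_preberi_pot : String := "10\nDESNO\n5\nLEVO\nLEVO\n3"

def Spec_preberi_pot (ukazi : String) (out : List (Int × Int)) : Prop := out = preberi_pot_alt ukazi
instance (ukazi : String) (out : List (Int × Int)) : Decidable (Spec_preberi_pot ukazi out) := by
  unfold Spec_preberi_pot; infer_instance

-- ===== CLAIM =====
def Claim_equal_preberi_pot : Prop :=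
  ∀ (ukazi : String), Dom_preberi_pot ukazi → Pre_preberi_pot ukazi →
    Spec_preberi_pot ukazi (preberi_pot ukazi)

-- ===== LEMMAS AND PROOFS =====

-- net turn count of a prefix (B's 1 + count LEVO - count DESNO)
def tcnt (l : List String) : Int :=
  1 + (PySem.List.count l "LEVO" : Int) - (PySem.List.count l "DESNO" : Int)

-- A's angle for a heading index 0..3
def angleOf (h : Int) : Int :=
  if h = 0 then 0 else if h = 1 then 90 else if h = 2 then 180 else -90

theorem premiki_append (l : List String) (el : String) :
    premiki (l ++ [el]) =
      premiki l ++
        (if el = "" ∨ el = "DESNO" ∨ el = "LEVO" then []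
         else
           match PySem.Int.ofStr? el with
           | some n =>
             let d := (PySem.List.pyGet? pvSmeri (PySem.Int.mod (tcnt l) 4)).getD (0, 0)
             [(d.1 * n, d.2 * n)]
           | none => []) := by
  unfold premiki
  rw [PySem.List.enumerate_append, List.foldl_append]
  have hpre : (PySem.List.enumerate l).foldl (premikStep (l ++ [el])) ([] : List (Int × Int)) =
      (PySem.List.enumerate l).foldl (premikStep l) [] := by
    apply PySem.List.foldl_congr_mem
    intro acc p hp
    obtain ⟨k, hk, rfl⟩ := (PySem.List.mem_enumerate_iff _ _ _).1 hp
    unfold premikStep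
    have hsl : PySem.List.slice (l ++ [el]) none (some ((0 : Int) + k)) =
        PySem.List.slice l none (some ((0 : Int) + k)) := by
      have h0 : ((0 : Int) + k) = ((k : Nat) : Int) := by ring
      rw [h0, PySem.List.slice_to_natCast, PySem.List.slice_to_natCast,
        List.take_append_of_le_length (le_of_lt hk)]
    rw [hsl]
  rw [hpre]
  simp only [PySem.List.enumerate, List.foldl_cons, List.foldl_nil]
  unfold premikStep
  have hsl : PySem.List.slice (l ++ [el]) none (some ((0 : Int) + l.length)) = l := by
    have h0 : ((0 : Int) + l.length) = ((l.length : Nat) : Int) := by ring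
    rw [h0, PySem.List.slice_to_natCast, List.take_append_of_le_length (le_refl _), List.take_length]
  simp only [hsl]
  by_cases hc : el = "" ∨ el = "DESNO" ∨ el = "LEVO"
  · simp [hc]
  · simp only [hc, if_false]
    cases h : PySem.Int.ofStr? el <;> simp [tcnt]

theorem angle_desno (t : Int) :
    (if angleOf (PySem.Int.mod t 4) = -90 then 180 else angleOf (PySem.Int.mod t 4) - 90)
      = angleOf (PySem.Int.mod (t - 1) 4) := by
  rw [PySem.Int.mod_eq_emod_of_pos (by norm_num), PySem.Int.mod_eq_emod_of_pos (by norm_num)]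
  have hc : t % 4 = 0 ∨ t % 4 = 1 ∨ t % 4 = 2 ∨ t % 4 = 3 := by omega
  rcases hc with h|h|h|h <;> rw [h] <;>
    [rw [show (t-1)%4 = 3 by omega]; rw [show (t-1)%4 = 0 by omega];
     rw [show (t-1)%4 = 1 by omega]; rw [show (t-1)%4 = 2 by omega]] <;>
    norm_num [angleOf]

theorem angle_levo (t : Int) :
    (if angleOf (PySem.Int.mod t 4) = 180 then -90 else angleOf (PySem.Int.mod t 4) + 90)
      = angleOf (PySem.Int.mod (t + 1) 4) := by
  rw [PySem.Int.mod_eq_emod_of_pos (by norm_num), PySem.Int.mod_eq_emod_of_pos (by norm_num)]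
  have hc : t % 4 = 0 ∨ t % 4 = 1 ∨ t % 4 = 2 ∨ t % 4 = 3 := by omega
  rcases hc with h|h|h|h <;> rw [h] <;>
    [rw [show (t+1)%4 = 1 by omega]; rw [show (t+1)%4 = 2 by omega];
     rw [show (t+1)%4 = 3 by omega]; rw [show (t+1)%4 = 0 by omega]] <;>
    norm_num [angleOf]

theorem move_eq (t n : Int) (k : Int × Int) :
    (if angleOf (PySem.Int.mod t 4) = 0 then (k.1 + n, k.2)
     else if angleOf (PySem.Int.mod t 4) = 90 then (k.1, k.2 - n)
     else if angleOf (PySem.Int.mod t 4) = 180 then (k.1 - n, k.2)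
     else if angleOf (PySem.Int.mod t 4) = -90 then (k.1, k.2 + n) else k)
    = (k.1 + ((PySem.List.pyGet? pvSmeri (PySem.Int.mod t 4)).getD (0, 0)).1 * n,
       k.2 + ((PySem.List.pyGet? pvSmeri (PySem.Int.mod t 4)).getD (0, 0)).2 * n) := by
  rw [PySem.Int.mod_eq_emod_of_pos (by norm_num)]
  have hc : t % 4 = 0 ∨ t % 4 = 1 ∨ t % 4 = 2 ∨ t % 4 = 3 := by omega
  rcases hc with h|h|h|h <;> rw [h] <;>
    simp [angleOf, pvSmeri, PySem.List.pyGet?, PySem.List.pyIdx?] <;> ring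

theorem count_singleton_ne (v el : String) (h : ¬ el = v) : List.count v [el] = 0 := by
  simp [h]

theorem mainA (l : List String) :
    l.foldl preberiStepA (90, (0, 0), [(0, 0)]) =
      (angleOf (PySem.Int.mod (tcnt l) 4),
       ((premiki l).foldl potStep ((0, 0), [(0, 0)])).1,
       ((premiki l).foldl potStep ((0, 0), [(0, 0)])).2) := by
  induction l using List.reverseRecOn with
  | nil => rfl
  | append_singleton l el ih =>
    rw [List.foldl_append, ih, premiki_append l el]
    simp only [List.foldl_cons, List.foldl_nil]
    by_cases hD : el = "DESNO"
    · subst hD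
      have ht : tcnt (l ++ ["DESNO"]) = tcnt l - 1 := by
        simp only [tcnt, PySem.List.count_eq, List.count_append,
          show List.count "LEVO" ["DESNO"] = 0 from by decide,
          show List.count "DESNO" ["DESNO"] = 1 from by decide]
        push_cast; ring
      simp only [preberiStepA]
      rw [if_pos trivial, ht, angle_desno]
      simp
    by_cases hL : el = "LEVO"
    · subst hL
      have ht : tcnt (l ++ ["LEVO"]) = tcnt l + 1 := by
        simp only [tcnt, PySem.List.count_eq, List.count_append,
          show List.count "LEVO" ["LEVO"] = 1 from by decide,
          show List.count "DESNO" ["LEVO"] = 0 from by decide]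
        push_cast; ring
      simp only [preberiStepA]
      rw [if_neg (by decide : ¬ ("LEVO" : String) = "DESNO"), if_pos trivial, ht, angle_levo]
      simp
    have ht : tcnt (l ++ [el]) = tcnt l := by
      simp only [tcnt, PySem.List.count_eq, List.count_append,
        count_singleton_ne _ _ hL, count_singleton_ne _ _ hD]
      push_cast; ring
    by_cases hE : el = ""
    · subst hE
      simp only [preberiStepA]
      simp [ht]
    · have hcond : ¬ (el = "" ∨ el = "DESNO" ∨ el = "LEVO") := by
        exact fun h => h.elim hE (fun h => h.elim hD hL)
      simp only [preberiStepA]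
      rw [if_neg hD, if_neg hL, if_pos (by simpa using hE : el ≠ ""), if_neg hcond]
      cases hP : PySem.Int.ofStr? el with
      | none => simp [ht]
      | some n =>
        rw [List.foldl_append]
        simp only [List.foldl_cons, List.foldl_nil, ht, move_eq, potStep]-- ===== VERDICT =====
theorem preberi_pot_spec : Claim_equal_preberi_pot := by
  intro ukazi _ _
  unfold Spec_preberi_pot preberi_pot preberi_pot_alt
  rw [mainA]
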